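-- pv_equiv track=rewrite | github.com/IPU-ChenFei/ipu_icx_network_toolkit | src/provider/memory_provider.py | get_populated_channel_configuration
-- ===== SOURCE A (Python) =====
-- def get_populated_channel_configuration(new_locator_size_dict, locator_list):
--     """
--     Function to get populated dimm information channel wise in a dictionary
--
--     :param new_locator_size_dict: populated dimm location and its sizes in a dict
--     :param locator_list: populated dimm locations in a list
--     :return: new_channel_info_dict
--     """
--
--     new_channel_info_dict = {}
--     cpu_list = []
--     for dict_slot_keys in new_locator_size_dict:
--         if dict_slot_keys in locator_list:
--             new_key = dict_slot_keys.split("_")[-1]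
--             cpu_list.append(dict_slot_keys.split("_")[0])
--             cpu_socket_number = dict_slot_keys.split("_")[0]
--             new_key = "CHANNEL " + ''.join([channel for channel in new_key if not channel.isdigit()])
--             new_channel_info_dict.setdefault(cpu_socket_number, dict())
--             if new_locator_size_dict[dict_slot_keys] != "No Module Installed":
--                 new_channel_info_dict[cpu_socket_number][new_key] = \
--                     new_channel_info_dict[cpu_socket_number].setdefault(new_key, 0) + 1
--
--             else:
--                 new_channel_info_dict[cpu_socket_number][new_key] = \
--                     new_channel_info_dict[cpu_socket_number].setdefault(new_key, 0) + 0
--     return new_channel_info_dict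
-- ===== SOURCE B (Python) =====
-- def get_populated_channel_configuration(new_locator_size_dict, locator_list):
--     """Two-phase rewrite: first build a grouping table keyed by (cpu, channel)
--     holding the raw size strings, then aggregate each group into the nested
--     result dict by counting installed modules.  The unused cpu_list is dropped."""
--     groups = {}
--     for key, size in new_locator_size_dict.items():
--         if key in locator_list:
--             cpu = key.split("_")[0]
--             channel = "CHANNEL " + ''.join(ch for ch in key.split("_")[-1] if not ch.isdigit())
--             groups.setdefault((cpu, channel), []).append(size)
--     result = {}
--     for (cpu, channel), sizes in groups.items():
--         result.setdefault(cpu, {})[channel] = sum(1 for s in sizes if s != "No Module Installed")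
--     return result
-- ===== Notes on version B (the rewrite author's own statement) =====
-- stated objective: alternative
-- what changed: B replaces A's single pass that increments nested per-socket/per-channel counters inline with two phases: a first pass materialises a grouping table keyed by (socket, channel) holding the raw size strings, a second pass aggregates each group by counting sizes != 'No Module Installed' into the nested result dict; the unused cpu_list is dropped.
import Mathlib
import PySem

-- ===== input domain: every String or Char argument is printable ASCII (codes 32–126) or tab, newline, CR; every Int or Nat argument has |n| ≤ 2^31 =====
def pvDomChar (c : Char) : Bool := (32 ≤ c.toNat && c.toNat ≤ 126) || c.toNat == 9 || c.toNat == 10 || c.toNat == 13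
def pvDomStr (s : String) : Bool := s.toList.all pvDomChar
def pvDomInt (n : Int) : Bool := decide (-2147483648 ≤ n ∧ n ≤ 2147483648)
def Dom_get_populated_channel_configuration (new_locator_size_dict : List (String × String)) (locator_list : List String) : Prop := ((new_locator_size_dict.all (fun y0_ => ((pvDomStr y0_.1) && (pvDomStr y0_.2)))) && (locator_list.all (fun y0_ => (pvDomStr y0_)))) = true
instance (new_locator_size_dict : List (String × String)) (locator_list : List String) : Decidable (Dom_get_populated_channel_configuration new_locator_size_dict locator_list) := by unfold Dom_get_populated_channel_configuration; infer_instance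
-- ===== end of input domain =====

-- B changes the decomposition: a grouping table (socket, channel) ↦ sizes is built first, then
-- aggregated into the nested result dict, instead of A's inline nested-counter increments
-- (same cost, no speed claim; A's unused cpu_list is dropped).
-- Shared helpers: exact Python-dict primitives on association lists
-- (first-match lookup; assignment overwrites in place, new keys append at the end).
def pvFind? {κ β : Type} [DecidableEq κ] : List (κ × β) → κ → Option β
  | [], _ => none
  | (k, v) :: t, x => if k = x then some v else pvFind? t x

def pvSetIn {κ β : Type} [DecidableEq κ] : List (κ × β) → κ → β → List (κ × β)
  | [], k, v => [(k, v)]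
  | (k', v') :: t, k, v => if k' = k then (k, v) :: t else (k', v') :: pvSetIn t k v

def pvSd {κ β : Type} [DecidableEq κ] (r : List (κ × β)) (k : κ) (v : β) : List (κ × β) :=
  if (pvFind? r k).isSome then r else r ++ [(k, v)]

-- key.split("_")[0]  (split never returns an empty list, so headD's default is dead)
def pvSocket (k : String) : String := String.ofList ((PySem.Chars.splitOn k.toList ['_']).headD [])
-- "CHANNEL " + ''.join(ch for ch in key.split("_")[-1] if not ch.isdigit())
def pvChan (k : String) : String :=
  String.ofList ("CHANNEL ".toList ++ ((PySem.Chars.splitOn k.toList ['_']).getLastD []).filter (fun c => !PySem.Chars.isdigit c))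

-- ===== PORT A =====
-- the loop body of A (A's cpu_list is built but never used: omitted)
def pvStepA (d : List (String × String)) (loc : List String)
    (res : List (String × List (String × Int))) (kv : String × String) : List (String × List (String × Int)) :=
  if kv.1 ∈ loc then
    let s := pvSocket kv.1
    let c := pvChan kv.1
    let res1 := pvSd res s []                                  -- new_channel_info_dict.setdefault(cpu_socket_number, dict())
    let inner := (pvFind? res1 s).getD []
    let v := (pvFind? d kv.1).getD ""                          -- new_locator_size_dict[dict_slot_keys] (key always present)
    let old : Int := (pvFind? inner c).getD 0                  -- ….setdefault(new_key, 0)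
    let inner1 := if (pvFind? inner c).isSome then inner else inner ++ [(c, 0)]
    pvSetIn res1 s (pvSetIn inner1 c (old + (if v ≠ "No Module Installed" then 1 else 0)))
  else res

def get_populated_channel_configuration (new_locator_size_dict : List (String × String)) (locator_list : List String) : List (String × List (String × Int)) :=
  new_locator_size_dict.foldl (pvStepA new_locator_size_dict locator_list) []

-- ===== PORT B =====
-- groups.setdefault((socket, channel), []).append(size)
def pvAddGroup : List ((String × String) × List String) → (String × String) → String → List ((String × String) × List String)
  | [], key, v => [(key, [v])]
  | (k', l) :: t, key, v => if k' = key then (k', l ++ [v]) :: t else (k', l) :: pvAddGroup t key v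

-- first pass: build the grouping table
def pvStepB (loc : List String) (g : List ((String × String) × List String)) (kv : String × String) : List ((String × String) × List String) :=
  if kv.1 ∈ loc then pvAddGroup g (pvSocket kv.1, pvChan kv.1) kv.2 else g

-- sum(1 for s in sizes if s != 'No Module Installed')
def pvCnt (sizes : List String) : Int :=
  sizes.foldl (fun n x => if x ≠ "No Module Installed" then n + 1 else n) 0

-- second pass body: result.setdefault(socket, {})[channel] = pvCnt sizes
def pvStep2 (res : List (String × List (String × Int))) (gr : (String × String) × List String) : List (String × List (String × Int)) :=
  let res1 := pvSd res gr.1.1 []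
  pvSetIn res1 gr.1.1 (pvSetIn ((pvFind? res1 gr.1.1).getD []) gr.1.2 (pvCnt gr.2))

def pvConsume (g : List ((String × String) × List String)) : List (String × List (String × Int)) :=
  g.foldl pvStep2 []

def get_populated_channel_configuration_alt (new_locator_size_dict : List (String × String)) (locator_list : List String) : List (String × List (String × Int)) :=
  pvConsume (new_locator_size_dict.foldl (pvStepB locator_list) [])

-- ===== PRECONDITION & SPEC =====
-- Pre_ excludes association lists with duplicate keys: a Python dict cannot contain them, so such
-- lists have no faithful dict counterpart (Python collapses them before A ever runs).
def Pre_get_populated_channel_configuration (new_locator_size_dict : List (String × String)) (locator_list : List String) : Prop :=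
  (new_locator_size_dict.map Prod.fst).Nodup
instance (new_locator_size_dict : List (String × String)) (locator_list : List String) : Decidable (Pre_get_populated_channel_configuration new_locator_size_dict locator_list) := by unfold Pre_get_populated_channel_configuration; infer_instance

def pvWitness_get_populated_channel_configuration : (List (String × String)) × List String :=
  ([("CPU0_A1", "8 GB"), ("CPU0_A2", "No Module Installed")], ["CPU0_A1", "CPU0_A2"])

def Spec_get_populated_channel_configuration (new_locator_size_dict : List (String × String)) (locator_list : List String) (out : List (String × List (String × Int))) : Prop := out = get_populated_channel_configuration_alt new_locator_size_dict locator_list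
instance (new_locator_size_dict : List (String × String)) (locator_list : List String) (out : List (String × List (String × Int))) : Decidable (Spec_get_populated_channel_configuration new_locator_size_dict locator_list out) := by unfold Spec_get_populated_channel_configuration; infer_instance

-- ===== CLAIM (what is proved, stated in full; the proofs are below) =====
def Claim_equal_get_populated_channel_configuration : Prop := ∀ (new_locator_size_dict : List (String × String)) (locator_list : List String), Dom_get_populated_channel_configuration new_locator_size_dict locator_list → Pre_get_populated_channel_configuration new_locator_size_dict locator_list → Spec_get_populated_channel_configuration new_locator_size_dict locator_list (get_populated_channel_configuration new_locator_size_dict locator_list)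

-- ===== LEMMAS AND PROOFS =====

-- basic facts about the association-list primitives
theorem find_setIn_self {κ β : Type} [DecidableEq κ] (r : List (κ × β)) (k : κ) (v : β) :
    pvFind? (pvSetIn r k v) k = some v := by
  induction r with
  | nil => simp [pvSetIn, pvFind?]
  | cons h t ih => obtain ⟨k', v'⟩ := h; by_cases hk : k' = k <;> simp [pvSetIn, pvFind?, hk, ih]

theorem find_setIn_ne {κ β : Type} [DecidableEq κ] (r : List (κ × β)) (k x : κ) (v : β) (hx : x ≠ k) :
    pvFind? (pvSetIn r k v) x = pvFind? r x := by
  induction r with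
  | nil => simp [pvSetIn, pvFind?, Ne.symm hx]
  | cons h t ih =>
      obtain ⟨k', v'⟩ := h
      by_cases hk : k' = k
      · subst hk; simp [pvSetIn, pvFind?, Ne.symm hx]
      · simp [pvSetIn, pvFind?, hk, ih]

theorem setIn_setIn {κ β : Type} [DecidableEq κ] (r : List (κ × β)) (k : κ) (a b : β) :
    pvSetIn (pvSetIn r k a) k b = pvSetIn r k b := by
  induction r with
  | nil => simp [pvSetIn]
  | cons h t ih => obtain ⟨k', v'⟩ := h; by_cases hk : k' = k <;> simp [pvSetIn, hk, ih]

theorem setIn_absent {κ β : Type} [DecidableEq κ] (r : List (κ × β)) (k : κ) (v : β) (h : pvFind? r k = none) :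
    pvSetIn r k v = r ++ [(k, v)] := by
  induction r with
  | nil => simp [pvSetIn]
  | cons hd t ih =>
      obtain ⟨k', v'⟩ := hd
      by_cases hk : k' = k
      · simp [pvFind?, hk] at h
      · simp [pvFind?, hk] at h
        simp [pvSetIn, hk, ih h]

theorem find_append_ne {κ β : Type} [DecidableEq κ] (r t : List (κ × β)) (x : κ)
    (hx : ∀ p ∈ t, p.1 ≠ x) : pvFind? (r ++ t) x = pvFind? r x := by
  induction r with
  | nil =>
      induction t with
      | nil => rfl
      | cons hd s ih =>
          obtain ⟨k', v'⟩ := hd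
          simp [pvFind?, hx (k', v') (by simp)]
          exact ih (fun p hp => hx p (by simp [hp]))
  | cons hd s ih => obtain ⟨k', v'⟩ := hd; by_cases hk : k' = x <;> simp [pvFind?, hk, ih]

theorem find_append_left {κ β : Type} [DecidableEq κ] (r t : List (κ × β)) (k : κ) (w : β)
    (h : pvFind? r k = some w) : pvFind? (r ++ t) k = some w := by
  induction r with
  | nil => simp [pvFind?] at h
  | cons hd s ih =>
      obtain ⟨k', v'⟩ := hd
      by_cases hk : k' = k <;> simp_all [pvFind?, hk]

theorem find_append_self_absent {κ β : Type} [DecidableEq κ] (r : List (κ × β)) (k : κ) (v : β)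
    (h : pvFind? r k = none) : pvFind? (r ++ [(k, v)]) k = some v := by
  induction r with
  | nil => simp [pvFind?]
  | cons hd s ih =>
      obtain ⟨k', v'⟩ := hd
      by_cases hk : k' = k <;> simp_all [pvFind?, hk]

theorem setIn_append_present {κ β : Type} [DecidableEq κ] (r t : List (κ × β)) (k : κ) (v : β)
    (h : (pvFind? r k).isSome) : pvSetIn (r ++ t) k v = pvSetIn r k v ++ t := by
  induction r with
  | nil => simp [pvFind?] at h
  | cons hd s ih =>
      obtain ⟨k', v'⟩ := hd
      by_cases hk : k' = k
      · simp [pvSetIn, hk]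
      · simp [pvFind?, hk] at h
        simp [pvSetIn, hk, ih h]

theorem setIn_append_absent {κ β : Type} [DecidableEq κ] (r : List (κ × β)) (k : κ) (a b : β)
    (h : pvFind? r k = none) : pvSetIn (r ++ [(k, a)]) k b = r ++ [(k, b)] := by
  induction r with
  | nil => simp [pvSetIn]
  | cons hd s ih =>
      obtain ⟨k', v'⟩ := hd
      by_cases hk : k' = k
      · simp [pvFind?, hk] at h
      · simp [pvFind?, hk] at h
        simp [pvSetIn, hk, ih h]

theorem setIn_comm {κ β : Type} [DecidableEq κ] (r : List (κ × β)) (k k' : κ) (a b : β)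
    (hk : (pvFind? r k).isSome) (hne : k ≠ k') :
    pvSetIn (pvSetIn r k a) k' b = pvSetIn (pvSetIn r k' b) k a := by
  induction r with
  | nil => simp [pvFind?] at hk
  | cons hd t ih =>
      obtain ⟨k0, v0⟩ := hd
      by_cases h1 : k0 = k
      · subst h1
        simp [pvSetIn, hne, Ne.symm hne]
      · simp [pvFind?, h1] at hk
        by_cases h2 : k0 = k'
        · subst h2
          simp [pvSetIn, h1, Ne.symm hne]
        · simp [pvSetIn, h1, h2, ih hk]

-- A's per-item increment
def pvInc (v : String) : Int := if v ≠ "No Module Installed" then 1 else 0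

theorem cnt_singleton (v : String) : pvCnt [v] = pvInc v := by
  simp [pvCnt, pvInc, List.foldl]

theorem cnt_append (l : List String) (v : String) : pvCnt (l ++ [v]) = pvCnt l + pvInc v := by
  simp [pvCnt, pvInc, List.foldl_append, List.foldl]
  split <;> omega

-- A's whole guarded update, in normal form
def pvUpd (res : List (String × List (String × Int))) (s c : String) (i : Int) : List (String × List (String × Int)) :=
  let res1 := pvSd res s []
  let inner := (pvFind? res1 s).getD []
  pvSetIn res1 s (pvSetIn inner c ((pvFind? inner c).getD 0 + i))

def pvStepA' (loc : List String) (res : List (String × List (String × Int))) (kv : String × String) : List (String × List (String × Int)) :=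
  if kv.1 ∈ loc then pvUpd res (pvSocket kv.1) (pvChan kv.1) (pvInc kv.2) else res

theorem stepA_eq_upd (d : List (String × String)) (loc : List String) (res : List (String × List (String × Int))) (kv : String × String) :
    pvStepA d loc res kv =
      if kv.1 ∈ loc then pvUpd res (pvSocket kv.1) (pvChan kv.1) (pvInc ((pvFind? d kv.1).getD "")) else res := by
  by_cases hm : kv.1 ∈ loc
  · simp only [pvStepA, pvUpd, pvInc, hm, if_pos]
    set inner := (pvFind? (pvSd res (pvSocket kv.1) []) (pvSocket kv.1)).getD [] with hinner
    by_cases hc : (pvFind? inner (pvChan kv.1)).isSome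
    · simp [hc]
    · simp only [hc, if_neg, Bool.false_eq_true, not_false_iff]
      rw [Option.not_isSome_iff_eq_none] at hc
      rw [setIn_append_absent _ _ _ _ hc, setIn_absent _ _ _ hc]
  · simp [pvStepA, hm]

-- normal forms of the two per-step updates
theorem step2_present (R : List (String × List (String × Int))) (s c : String) (l : List String)
    (w : List (String × Int)) (hw : pvFind? R s = some w) :
    pvStep2 R ((s, c), l) = pvSetIn R s (pvSetIn w c (pvCnt l)) := by
  simp [pvStep2, pvSd, hw]

theorem step2_absent (R : List (String × List (String × Int))) (s c : String) (l : List String)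
    (h : pvFind? R s = none) :
    pvStep2 R ((s, c), l) = R ++ [(s, [(c, pvCnt l)])] := by
  simp only [pvStep2, pvSd, h, Option.isSome_none, Bool.false_eq_true, if_neg, not_false_iff]
  rw [find_append_self_absent _ _ _ h]
  rw [setIn_append_absent _ _ _ _ h]
  rfl

theorem upd_present (R : List (String × List (String × Int))) (s c : String) (i : Int)
    (w : List (String × Int)) (hw : pvFind? R s = some w) :
    pvUpd R s c i = pvSetIn R s (pvSetIn w c ((pvFind? w c).getD 0 + i)) := by
  simp [pvUpd, pvSd, hw]

theorem upd_absent (R : List (String × List (String × Int))) (s c : String) (i : Int)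
    (h : pvFind? R s = none) :
    pvUpd R s c i = R ++ [(s, [(c, 0 + i)])] := by
  simp only [pvUpd, pvSd, h, Option.isSome_none, Bool.false_eq_true, if_neg, not_false_iff]
  rw [find_append_self_absent _ _ _ h]
  rw [setIn_append_absent _ _ _ _ h]
  rfl

-- "channel c of socket s is present in the nested result"
def pvHasChan (R : List (String × List (String × Int))) (s c : String) : Prop :=
  ∃ inn, pvFind? R s = some inn ∧ (pvFind? inn c).isSome

theorem consume_append (g : List ((String × String) × List String)) (y : (String × String) × List String) :
    pvConsume (g ++ [y]) = pvStep2 (pvConsume g) y := by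
  simp [pvConsume, List.foldl_append]

theorem consume_channels (g : List ((String × String) × List String)) (s c : String) :
    pvHasChan (pvConsume g) s c ↔ (s, c) ∈ g.map Prod.fst := by
  induction g using List.reverseRecOn with
  | nil => simp [pvConsume, pvHasChan, pvFind?]
  | append_singleton g' y ih =>
      obtain ⟨⟨s', c'⟩, l'⟩ := y
      rw [consume_append]
      rcases hs' : pvFind? (pvConsume g') s' with _ | w
      · rw [step2_absent _ _ _ _ hs']
        by_cases hss : s = s'
        · subst hss
          constructor
          · rintro ⟨inn, h1, h2⟩
            rw [find_append_self_absent _ _ _ hs'] at h1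
            cases h1
            by_cases hcc : c = c'
            · simp [hcc]
            · simp [pvFind?, Ne.symm hcc] at h2
          · intro hmem
            refine ⟨[(c', pvCnt l')], find_append_self_absent _ _ _ hs', ?_⟩
            simp only [List.map_append, List.map_cons, List.mem_append, List.mem_singleton] at hmem
            rcases hmem with hmem | hmem
            · exact absurd ((ih).mpr hmem) (by rintro ⟨inn, h1, _⟩; rw [hs'] at h1; cases h1)
            · simp only [List.map_nil, List.mem_cons, List.not_mem_nil, or_false, Prod.mk.injEq, true_and] at hmem
              subst hmem; simp [pvFind?]
        · have hfind : ∀ (inn : List (String × Int)), pvFind? (pvConsume g' ++ [(s', [(c', pvCnt l')])]) s = pvFind? (pvConsume g') s :=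
            fun _ => find_append_ne _ _ _ (by rintro p hp; simp at hp; subst hp; exact Ne.symm hss)
          constructor
          · rintro ⟨inn, h1, h2⟩
            rw [hfind inn] at h1
            have := ih.mp ⟨inn, h1, h2⟩
            simp [this]
          · intro hmem
            simp only [List.map_append, List.map_cons, List.mem_append, List.mem_singleton] at hmem
            rcases hmem with hmem | hmem
            · obtain ⟨inn, h1, h2⟩ := ih.mpr hmem
              exact ⟨inn, by rw [hfind inn]; exact h1, h2⟩
            · exact absurd hmem (by simp only [List.map_nil, List.mem_cons, List.not_mem_nil, or_false, Prod.mk.injEq, not_and]; intro h _; exact hss h)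
      · rw [step2_present _ _ _ _ _ hs']
        by_cases hss : s = s'
        · subst hss
          rw [pvHasChan]
          constructor
          · rintro ⟨inn, h1, h2⟩
            rw [find_setIn_self] at h1
            cases h1
            by_cases hcc : c = c'
            · simp [hcc]
            · rw [find_setIn_ne _ _ _ _ hcc] at h2
              have := ih.mp ⟨w, hs', h2⟩
              simp [this]
          · intro hmem
            refine ⟨pvSetIn w c' (pvCnt l'), find_setIn_self _ _ _, ?_⟩
            by_cases hcc : c = c'
            · subst hcc; simp [find_setIn_self]
            · rw [find_setIn_ne _ _ _ _ hcc]
              simp only [List.map_append, List.map_cons, List.mem_append, List.mem_singleton] at hmem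
              rcases hmem with hmem | hmem
              · obtain ⟨inn, h1, h2⟩ := ih.mpr hmem
                rw [hs'] at h1; cases h1; exact h2
              · exact absurd hmem (by simp [hcc])
        · rw [pvHasChan]
          constructor
          · rintro ⟨inn, h1, h2⟩
            rw [find_setIn_ne _ _ _ _ hss] at h1
            have := ih.mp ⟨inn, h1, h2⟩
            simp [this]
          · intro hmem
            simp only [List.map_append, List.map_cons, List.mem_append, List.mem_singleton] at hmem
            rcases hmem with hmem | hmem
            · obtain ⟨inn, h1, h2⟩ := ih.mpr hmem
              exact ⟨inn, by rw [find_setIn_ne _ _ _ _ hss]; exact h1, h2⟩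
            · exact absurd hmem (by simp only [List.map_nil, List.mem_cons, List.not_mem_nil, or_false, Prod.mk.injEq, not_and]; intro h _; exact hss h)

-- pvAddGroup structure lemmas
theorem addGroup_append_not_mem (g t : List ((String × String) × List String)) (key : String × String) (v : String)
    (h : key ∉ g.map Prod.fst) : pvAddGroup (g ++ t) key v = g ++ pvAddGroup t key v := by
  induction g with
  | nil => simp
  | cons hd s ih =>
      obtain ⟨k', l⟩ := hd
      simp only [List.map_cons, List.mem_cons, not_or] at h
      simp [pvAddGroup, Ne.symm h.1, ih h.2]

theorem addGroup_append_mem (g t : List ((String × String) × List String)) (key : String × String) (v : String)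
    (h : key ∈ g.map Prod.fst) : pvAddGroup (g ++ t) key v = pvAddGroup g key v ++ t := by
  induction g with
  | nil => simp at h
  | cons hd s ih =>
      obtain ⟨k', l⟩ := hd
      by_cases hk : k' = key
      · simp [pvAddGroup, hk]
      · simp only [List.map_cons, List.mem_cons] at h
        rcases h with h | h
        · exact absurd h.symm hk
        · simp [pvAddGroup, hk, ih h]

theorem addGroup_keys (g : List ((String × String) × List String)) (key : String × String) (v : String) :
    (pvAddGroup g key v).map Prod.fst =
      if key ∈ g.map Prod.fst then g.map Prod.fst else g.map Prod.fst ++ [key] := by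
  induction g with
  | nil => simp [pvAddGroup]
  | cons hd s ih =>
      obtain ⟨k', l⟩ := hd
      by_cases hk : k' = key
      · simp [pvAddGroup, hk]
      · have h1 : pvAddGroup ((k', l) :: s) key v = (k', l) :: pvAddGroup s key v := by
          simp [pvAddGroup, hk]
        rw [h1]
        by_cases hm : key ∈ s.map Prod.fst
        · simp [ih, hm, Ne.symm hk]
        · simp [ih, hm, Ne.symm hk]

theorem addGroup_nodup (g : List ((String × String) × List String)) (key : String × String) (v : String)
    (h : (g.map Prod.fst).Nodup) : ((pvAddGroup g key v).map Prod.fst).Nodup := by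
  rw [addGroup_keys]
  by_cases hm : key ∈ g.map Prod.fst
  · simp [hm, h]
  · rw [if_neg hm]
    exact h.append (List.nodup_singleton _) (fun a ha hb => hm (by simp only [List.mem_cons, List.not_mem_nil, or_false] at hb; exact hb ▸ ha))

-- key step lemmas
theorem upd_after_step2 (R : List (String × List (String × Int))) (s c : String) (l : List String) (v : String) :
    pvUpd (pvStep2 R ((s, c), l)) s c (pvInc v) = pvStep2 R ((s, c), l ++ [v]) := by
  rcases hs : pvFind? R s with _ | w
  · rw [step2_absent _ _ _ _ hs, step2_absent _ _ _ _ hs]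
    rw [upd_present _ _ _ _ _ (find_append_self_absent _ _ _ hs)]
    rw [setIn_append_absent _ _ _ _ hs]
    simp [pvFind?, pvSetIn, cnt_append]
  · rw [step2_present _ _ _ _ _ hs, step2_present _ _ _ _ _ hs]
    rw [upd_present _ _ _ _ _ (find_setIn_self _ _ _)]
    rw [setIn_setIn, setIn_setIn, find_setIn_self]
    simp [cnt_append]

theorem step2_single_eq_upd (R : List (String × List (String × Int))) (s c : String) (v : String)
    (h : ¬ pvHasChan R s c) :
    pvStep2 R ((s, c), [v]) = pvUpd R s c (pvInc v) := by
  rcases hs : pvFind? R s with _ | w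
  · rw [step2_absent _ _ _ _ hs, upd_absent _ _ _ _ hs, cnt_singleton]
    simp
  · have hc : pvFind? w c = none := by
      rcases hfc : pvFind? w c with _ | x
      · rfl
      · exact absurd ⟨w, hs, by rw [hfc]; rfl⟩ h
    rw [step2_present _ _ _ _ _ hs, upd_present _ _ _ _ _ hs, hc, cnt_singleton]
    simp

theorem upd_step2_comm (R : List (String × List (String × Int))) (s c : String) (i : Int)
    (y : (String × String) × List String) (hne : y.1 ≠ (s, c)) (hch : pvHasChan R s c) :
    pvUpd (pvStep2 R y) s c i = pvStep2 (pvUpd R s c i) y := by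
  obtain ⟨inn, hRs, hc⟩ := hch
  obtain ⟨⟨s', c'⟩, l'⟩ := y
  by_cases hss : s' = s
  · subst hss
    have hcc : c' ≠ c := fun h => hne (by simp [h])
    rw [step2_present _ _ _ _ _ hRs]
    rw [upd_present _ _ _ _ _ (find_setIn_self _ _ _)]
    rw [setIn_setIn, find_setIn_ne _ _ _ _ (Ne.symm hcc)]
    rw [upd_present _ _ _ _ _ hRs]
    rw [step2_present _ _ _ _ _ (find_setIn_self _ _ _)]
    rw [setIn_setIn]
    rw [setIn_comm _ _ _ _ _ hc (Ne.symm hcc)]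
  · rw [upd_present _ _ _ _ _ hRs]
    rcases hs' : pvFind? R s' with _ | w
    · rw [step2_absent _ _ _ _ hs']
      rw [upd_present _ _ _ _ _ (find_append_left _ _ _ _ hRs)]
      rw [setIn_append_present _ _ _ _ (by rw [hRs]; rfl)]
      rw [step2_absent _ _ _ _ (by rw [find_setIn_ne _ _ _ _ hss]; exact hs')]
    · rw [step2_present _ _ _ _ _ hs']
      rw [upd_present _ _ _ _ _ (by rw [find_setIn_ne _ _ _ _ (fun h => hss h.symm)]; exact hRs)]
      rw [step2_present _ _ _ _ _ (by rw [find_setIn_ne _ _ _ _ hss]; exact hs')]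
      rw [setIn_comm _ _ _ _ _ (by rw [hRs]; rfl) (fun h => hss h.symm)]

theorem consume_addGroup (g : List ((String × String) × List String)) (s c : String) (v : String)
    (hnd : (g.map Prod.fst).Nodup) :
    pvConsume (pvAddGroup g (s, c) v) = pvUpd (pvConsume g) s c (pvInc v) := by
  induction g using List.reverseRecOn with
  | nil =>
      show pvStep2 [] ((s, c), [v]) = pvUpd (pvConsume []) s c (pvInc v)
      rw [show pvConsume ([] : List ((String × String) × List String)) = [] from rfl]
      exact step2_single_eq_upd [] s c v (by rintro ⟨inn, h1, _⟩; rw [show pvFind? ([] : List (String × List (String × Int))) s = none from rfl] at h1; cases h1)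
  | append_singleton g' y ih =>
      obtain ⟨ky, ly⟩ := y
      have hnd' : (g'.map Prod.fst).Nodup := by
        have h2 : (g'.map Prod.fst ++ [ky]).Nodup := by simpa using hnd
        exact (List.nodup_append.mp h2).1
      have hky : ky ∉ g'.map Prod.fst := by
        have h2 : (g'.map Prod.fst ++ [ky]).Nodup := by simpa using hnd
        intro hmem
        exact (List.nodup_append.mp h2).2.2 ky hmem ky (List.mem_singleton_self _) rfl
      by_cases hy : ky = (s, c)
      · subst hy
        rw [addGroup_append_not_mem _ _ _ _ hky]
        show pvConsume (g' ++ pvAddGroup [((s,c), ly)] (s,c) v) = _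
        have : pvAddGroup [((s,c), ly)] (s,c) v = [((s,c), ly ++ [v])] := by simp [pvAddGroup]
        rw [this, consume_append, consume_append]
        exact (upd_after_step2 _ _ _ _ _).symm
      · by_cases hmem : (s, c) ∈ g'.map Prod.fst
        · rw [addGroup_append_mem _ _ _ _ hmem, consume_append, consume_append, ih hnd']
          exact (upd_step2_comm _ _ _ _ _ hy ((consume_channels g' s c).mpr hmem)).symm
        · have hnotmem : (s, c) ∉ (g' ++ [(ky, ly)]).map Prod.fst := by
            simp only [List.map_append, List.mem_append]
            rintro (h | h)
            · exact hmem h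
            · simp at h; exact hy h.symm
          have : pvAddGroup (g' ++ [(ky, ly)]) (s, c) v = (g' ++ [(ky, ly)]) ++ [((s, c), [v])] := by
            rw [addGroup_append_not_mem g' [(ky, ly)] _ _ hmem]
            rw [show pvAddGroup [(ky, ly)] (s, c) v = [(ky, ly), ((s, c), [v])] from by simp [pvAddGroup, hy]]
            simp
          rw [this, consume_append]
          exact step2_single_eq_upd _ _ _ _ (fun h => hnotmem ((consume_channels _ s c).mp h))

-- fold fusion: A's loop over the normalised step equals B's two phases
theorem foldA'_consume (loc : List String) (l : List (String × String)) (g : List ((String × String) × List String))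
    (hnd : (g.map Prod.fst).Nodup) :
    l.foldl (pvStepA' loc) (pvConsume g) = pvConsume (l.foldl (pvStepB loc) g) := by
  induction l generalizing g with
  | nil => rfl
  | cons kv t ih =>
      by_cases hm : kv.1 ∈ loc
      · simp only [List.foldl, pvStepA', pvStepB, hm, if_pos]
        rw [← consume_addGroup _ _ _ _ hnd]
        exact ih _ (addGroup_nodup _ _ _ hnd)
      · simp only [List.foldl, pvStepA', pvStepB, hm, if_neg, Bool.false_eq_true, not_false_iff]
        exact ih _ hnd

theorem nodup_find (d : List (String × String)) (hnd : (d.map Prod.fst).Nodup) :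
    ∀ kv ∈ d, pvFind? d kv.1 = some kv.2 := by
  induction d with
  | nil => simp
  | cons hd t ih =>
      obtain ⟨k0, v0⟩ := hd
      simp only [List.map_cons, List.nodup_cons] at hnd
      intro kv hkv
      rcases List.mem_cons.mp hkv with rfl | h
      · simp [pvFind?]
      · have hk : k0 ≠ kv.1 := fun he => hnd.1 (he ▸ List.mem_map_of_mem h)
        simp only [pvFind?, if_neg hk]
        exact ih hnd.2 kv h

theorem foldA_eq (d : List (String × String)) (loc : List String) :
    ∀ (l : List (String × String)) (res : List (String × List (String × Int))),
      (∀ kv ∈ l, pvFind? d kv.1 = some kv.2) →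
      l.foldl (pvStepA d loc) res = l.foldl (pvStepA' loc) res := by
  intro l
  induction l with
  | nil => intro res _; rfl
  | cons kv t ih =>
      intro res h
      simp only [List.foldl]
      rw [stepA_eq_upd, h kv (by simp)]
      simp only [Option.getD_some]
      rw [ih _ (fun p hp => h p (by simp [hp]))]
      rfl

-- ===== VERDICT (by name: the statement is the Claim_ definition above) =====
theorem get_populated_channel_configuration_spec : Claim_equal_get_populated_channel_configuration := by
  intro d loc _ hpre
  unfold Spec_get_populated_channel_configuration
  unfold get_populated_channel_configuration get_populated_channel_configuration_alt
  rw [foldA_eq d loc d [] (nodup_find d hpre)]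
  have := foldA'_consume loc d [] (by simp)
  simpa using this
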